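-- pv_equiv track=rewrite | github.com/habibullinrm/algorythms_q2 | dz_2.py | sort_by_last_digit
-- ===== SOURCE A (Python) =====
-- import heapq
-- from typing import List, Tuple
--
-- def sort_by_last_digit(arr:List[int])->List[int]:
--     '''
--     сортирует элементы массива по возрастанию последней цифры десятичной записи чисел.
--     :param arr: list
--     :return: list
--     '''
--     heap = []
--     for i in range(len(arr)):
--         heap.append(tuple([arr[i] % 10, i, arr[i]]))
--     heapq.heapify(heap)
--     result = []
--     while heap:
--         elem = heapq.heappop(heap)
--         result.append(elem[2])
--     return result
-- ===== SOURCE B (Python) =====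
-- def sort_by_last_digit(arr):
--     '''
--     Stable counting sort by the last decimal digit (n % 10): one pass into
--     10 buckets, then concatenate -- O(n) instead of a heap.
--     '''
--     buckets = [[] for _ in range(10)]
--     for x in arr:
--         buckets[x % 10].append(x)
--     return [x for bucket in buckets for x in bucket]
-- ===== Notes on version B (the rewrite author's own statement) =====
-- stated objective: faster
-- what changed: Replaces the heap of (last_digit, index, value) tuples (heapify + repeated heappop) by a single-pass counting sort into 10 buckets indexed by x % 10, concatenated in digit order, which preserves input order per digit exactly like the heap's index tie-break.
import Mathlib
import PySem

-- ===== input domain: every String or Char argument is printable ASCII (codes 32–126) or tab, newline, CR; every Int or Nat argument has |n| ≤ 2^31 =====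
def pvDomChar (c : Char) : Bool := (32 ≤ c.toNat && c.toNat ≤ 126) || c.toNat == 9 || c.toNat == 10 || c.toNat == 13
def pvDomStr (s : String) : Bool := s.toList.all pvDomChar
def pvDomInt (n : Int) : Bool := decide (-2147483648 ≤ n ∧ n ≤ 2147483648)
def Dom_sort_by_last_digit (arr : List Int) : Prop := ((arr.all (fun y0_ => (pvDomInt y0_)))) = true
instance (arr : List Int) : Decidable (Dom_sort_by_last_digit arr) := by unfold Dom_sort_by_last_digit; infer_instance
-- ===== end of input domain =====

-- B replaces A's heap of (last_digit, index, value) tuples by a one-pass counting sort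
-- into 10 buckets indexed by x % 10 (objective: faster).

-- ===== PORT A =====
-- Python tuple '<' on the (digit, index, value) triples (lexicographic)
def pvTupLt (a b : Int × Int × Int) : Bool :=
  a.1 < b.1 || (a.1 == b.1 && (a.2.1 < b.2.1 || (a.2.1 == b.2.1 && a.2.2 < b.2.2)))

-- one comparison step of the running minimum (heappop returns the heap's least tuple)
def pvMinStep (m x : Int × Int × Int) : Int × Int × Int := if pvTupLt x m then x else m

-- termination fact the pop loop cites: the running minimum is a member of the heap
theorem pvMin_mem (ts : List (Int × Int × Int)) (t : Int × Int × Int) :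
    ts.foldl pvMinStep t ∈ t :: ts := by
  induction ts generalizing t with
  | nil => simp
  | cons u us ih =>
    rw [List.foldl_cons]
    have h := ih (pvMinStep t u)
    have hm : pvMinStep t u = t ∨ pvMinStep t u = u := by
      unfold pvMinStep; split <;> simp
    rcases List.mem_cons.mp h with h | h
    · rw [h]; rcases hm with h' | h' <;> simp [h']
    · simp [h]

-- A's 'while heap: elem = heappop(heap); result.append(elem[2])' loop; heapify+heappop
-- are library calls, ported through their contract: pop the least tuple of the heap
def pvPopAll : List (Int × Int × Int) → List Int
  | [] => []
  | t :: ts =>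
    let m := ts.foldl pvMinStep t
    m.2.2 :: pvPopAll ((t :: ts).erase m)
termination_by l => l.length
decreasing_by
  have h := List.length_erase_of_mem (pvMin_mem ts t)
  simp_all

def sort_by_last_digit (arr : List Int) : List Int :=
  let heap := (PySem.List.pyRange 0 (arr.length : Int) 1).foldl
    (fun h i => h ++ [(PySem.Int.mod (PySem.List.pyGetD arr i 0) 10, i, PySem.List.pyGetD arr i 0)]) []
  pvPopAll heap

-- ===== PORT B =====
def sort_by_last_digit_alt (arr : List Int) : List Int :=
  let buckets := arr.foldl
    (fun bs x => bs.modify (PySem.Int.mod x 10).toNat (fun b => b ++ [x]))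
    (List.replicate 10 ([] : List Int))
  buckets.flatMap id

-- ===== PRECONDITION & SPEC =====
def Spec_sort_by_last_digit (arr : List Int) (out : List Int) : Prop := out = sort_by_last_digit_alt arr
instance (arr : List Int) (out : List Int) : Decidable (Spec_sort_by_last_digit arr out) := by unfold Spec_sort_by_last_digit; infer_instance

-- ===== CLAIM (what is proved, stated in full; the proofs are below) =====
def Claim_equal_sort_by_last_digit : Prop := ∀ (arr : List Int), Dom_sort_by_last_digit arr → Spec_sort_by_last_digit arr (sort_by_last_digit arr)

-- ===== LEMMAS AND PROOFS =====

def pvKey (x : Int) : Int := PySem.Int.mod x 10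

-- the lexicographic key the tuple comparison realises
def pvKeyT (t : Int × Int × Int) : Int ×ₗ (Int ×ₗ Int) := toLex (t.1, toLex (t.2.1, t.2.2))

theorem pvKeyT_inj : Function.Injective pvKeyT := by
  intro a b h
  obtain ⟨a1, a2, a3⟩ := a
  obtain ⟨b1, b2, b3⟩ := b
  simp [pvKeyT, toLex] at h
  simp_all

theorem pvTupLt_iff (a b : Int × Int × Int) : pvTupLt a b = true ↔ pvKeyT a < pvKeyT b := by
  obtain ⟨a1, a2, a3⟩ := a
  obtain ⟨b1, b2, b3⟩ := b
  simp [pvTupLt, pvKeyT, Prod.Lex.lt_iff]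

theorem pvKeyT_lt (a b : Int × Int × Int)
    (h : a.1 < b.1 ∨ (a.1 = b.1 ∧ a.2.1 < b.2.1)) : pvKeyT a < pvKeyT b := by
  rw [← pvTupLt_iff]
  rcases h with h | ⟨h1, h2⟩ <;> simp [pvTupLt, *]

-- the annotated input: (last digit, position, value) for each element
def pvT (arr : List Int) : List (Int × Int × Int) :=
  (PySem.List.enumerate arr 0).map (fun p => (pvKey p.2, p.1, p.2))

theorem pvHeap_eq (arr : List Int) :
    (PySem.List.pyRange 0 (arr.length : Int) 1).foldl
      (fun h i => h ++ [(PySem.Int.mod (PySem.List.pyGetD arr i 0) 10, i, PySem.List.pyGetD arr i 0)]) []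
    = pvT arr := by
  rw [PySem.List.foldl_append_singleton_eq_map
    (fun i => (PySem.Int.mod (PySem.List.pyGetD arr i 0) 10, i, PySem.List.pyGetD arr i 0))]
  rw [pvT, PySem.List.enumerate_eq_map_pyRange arr 0, List.map_map]
  rfl

theorem pvMin_le (ts : List (Int × Int × Int)) (t : Int × Int × Int) :
    ∀ u ∈ t :: ts, pvKeyT (ts.foldl pvMinStep t) ≤ pvKeyT u := by
  induction ts generalizing t with
  | nil => simp
  | cons v vs ih =>
    intro u hu
    rw [List.foldl_cons]
    have h := ih (pvMinStep t v)
    have hle : pvKeyT (pvMinStep t v) ≤ pvKeyT t ∧ pvKeyT (pvMinStep t v) ≤ pvKeyT v := by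
      unfold pvMinStep
      split
      · next hlt => exact ⟨le_of_lt ((pvTupLt_iff _ _).mp hlt), le_refl _⟩
      · next hlt =>
        refine ⟨le_refl _, le_of_not_gt fun hc => hlt ((pvTupLt_iff _ _).mpr hc)⟩
    have hhead := h _ (List.mem_cons_self ..)
    rcases List.mem_cons.mp hu with rfl | hu
    · exact le_trans hhead hle.1
    · rcases List.mem_cons.mp hu with rfl | hu
      · exact le_trans hhead hle.2
      · exact h u (List.mem_cons_of_mem _ hu)

-- triple-valued twin of the pop loop (proof device)
def pvPopAllT : List (Int × Int × Int) → List (Int × Int × Int)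
  | [] => []
  | t :: ts =>
    (ts.foldl pvMinStep t) :: pvPopAllT ((t :: ts).erase (ts.foldl pvMinStep t))
termination_by l => l.length
decreasing_by
  have h := List.length_erase_of_mem (pvMin_mem ts t)
  simp_all

theorem pvPopAll_eq_map : ∀ (S : List (Int × Int × Int)),
    pvPopAll S = (pvPopAllT S).map (fun t => t.2.2)
  | [] => by simp only [pvPopAll, pvPopAllT, List.map_nil]
  | t :: ts => by
    simp only [pvPopAll, pvPopAllT, List.map_cons]
    exact congrArg _ (pvPopAll_eq_map _)
termination_by S => S.length
decreasing_by
  have h := List.length_erase_of_mem (pvMin_mem ts t)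
  simp_all

theorem pvPopAllT_perm : ∀ (S : List (Int × Int × Int)), (pvPopAllT S).Perm S
  | [] => by simp only [pvPopAllT]; exact List.Perm.refl _
  | t :: ts => by
    simp only [pvPopAllT]
    exact ((pvPopAllT_perm _).cons _).trans (List.perm_cons_erase (pvMin_mem ts t)).symm
termination_by S => S.length
decreasing_by
  have h := List.length_erase_of_mem (pvMin_mem ts t)
  simp_all

theorem pvPopAllT_pairwise : ∀ (S : List (Int × Int × Int)), S.Nodup →
    (pvPopAllT S).Pairwise (fun a b => pvKeyT a < pvKeyT b)
  | [], _ => by simp only [pvPopAllT]; simp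
  | t :: ts, hnd => by
    simp only [pvPopAllT]
    have hnd' : ((t :: ts).erase (ts.foldl pvMinStep t)).Nodup := hnd.erase _
    refine List.pairwise_cons.mpr ⟨?_, pvPopAllT_pairwise _ hnd'⟩
    intro u hu
    have hu' := (pvPopAllT_perm _).mem_iff.mp hu
    have hune := (List.Nodup.mem_erase_iff hnd).mp hu'
    have hle := pvMin_le ts t u hune.2
    exact lt_of_le_of_ne hle fun h => hune.1 (pvKeyT_inj h).symm
termination_by S => S.length
decreasing_by
  have h := List.length_erase_of_mem (pvMin_mem ts t)
  simp_all

-- properties of the annotated list pvT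
theorem pvT_snd_pairwise (arr : List Int) :
    (pvT arr).Pairwise (fun a b => a.2.1 < b.2.1) := by
  have h := PySem.List.pairwise_lt_enumerate arr 0
  exact List.pairwise_map.mpr (h.imp (by intro p q hpq; simpa using hpq))

theorem pvT_nodup (arr : List Int) : (pvT arr).Nodup := by
  exact (pvT_snd_pairwise arr).imp
    (fun {a b} hlt => by intro he; rw [he] at hlt; exact lt_irrefl _ hlt)

theorem pvT_fst (arr : List Int) : ∀ t ∈ pvT arr, 0 ≤ t.1 ∧ t.1 < 10 := by
  intro t ht
  rw [pvT, List.mem_map] at ht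
  obtain ⟨p, _, rfl⟩ := ht
  exact ⟨PySem.Int.mod_nonneg _ (by norm_num), PySem.Int.mod_lt _ (by norm_num)⟩

theorem map_snd_filter_enumerate (q : Int → Bool) (arr : List Int) (s : Int) :
    ((PySem.List.enumerate arr s).filter (fun p => q p.2)).map (fun p => p.2)
      = arr.filter q := by
  induction arr generalizing s with
  | nil => simp [PySem.List.enumerate]
  | cons x xs ih =>
    simp only [PySem.List.enumerate, List.filter_cons]
    by_cases h : q x <;> simp [h, ih]

-- the bucket arrangement, as triples
def pvBT (arr : List Int) : List (Int × Int × Int) :=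
  (List.range 10).flatMap (fun d : ℕ => (pvT arr).filter (fun t => t.1 == (d : Int)))

theorem pvPartition_perm (ks : List Int) (hnd : ks.Nodup) :
    ∀ (S : List (Int × Int × Int)), (∀ t ∈ S, t.1 ∈ ks) →
    (ks.flatMap (fun d => S.filter (fun t => t.1 == d))).Perm S := by
  induction ks with
  | nil =>
    intro S hS
    cases S with
    | nil => simp
    | cons t ts => exact absurd (hS t (by simp)) (by simp)
  | cons k ks ih =>
    intro S hS
    simp only [List.flatMap_cons]
    have hsplit : (S.filter (fun t => t.1 == k) ++ S.filter (fun t => !(t.1 == k))).Perm S :=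
      List.filter_append_perm _ S
    have hrest : ∀ t ∈ S.filter (fun t => !(t.1 == k)), t.1 ∈ ks := by
      intro t ht
      rw [List.mem_filter] at ht
      rcases List.mem_cons.mp (hS t ht.1) with h | h
      · exact absurd h (by simpa using ht.2)
      · exact h
    have hmap : ks.flatMap (fun d => S.filter (fun t => t.1 == d))
        = ks.flatMap (fun d => (S.filter (fun t => !(t.1 == k))).filter (fun t => t.1 == d)) := by
      apply List.flatMap_congr
      intro d hd
      rw [List.filter_filter]
      apply (List.filter_congr _).symm
      intro t _
      have hdk : d ≠ k := fun h => (List.nodup_cons.mp hnd).1 (h ▸ hd)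
      by_cases h : t.1 = d <;> simp [h, hdk]
    rw [hmap]
    exact (List.Perm.append_left _
      (ih (List.nodup_cons.mp hnd).2 _ hrest)).trans hsplit

theorem pvBT_perm (arr : List Int) : (pvBT arr).Perm (pvT arr) := by
  have hks : (List.map (fun n : ℕ => (n : Int)) (List.range 10)).Nodup := by
    refine List.Nodup.map ?_ List.nodup_range
    intro a b hab
    simpa using hab
  have hmem : ∀ t ∈ pvT arr, t.1 ∈ List.map (fun n : ℕ => (n : Int)) (List.range 10) := by
    intro t ht
    obtain ⟨h1, h2⟩ := pvT_fst arr t ht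
    simp only [List.mem_map, List.mem_range]
    exact ⟨t.1.toNat, by omega, by omega⟩
  have h := pvPartition_perm _ hks (pvT arr) hmem
  rw [List.flatMap_map] at h
  exact h

theorem pvBT_pairwise (arr : List Int) :
    (pvBT arr).Pairwise (fun a b => pvKeyT a < pvKeyT b) := by
  rw [pvBT]
  have hsnd := pvT_snd_pairwise arr
  have key : ∀ (ks : List ℕ), ks.Pairwise (· < ·) →
      ((ks.flatMap (fun d : ℕ => (pvT arr).filter (fun t => t.1 == (d : Int))))).Pairwise
        (fun a b => pvKeyT a < pvKeyT b) := by
    intro ks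
    induction ks with
    | nil => intro _; exact List.Pairwise.nil
    | cons k ks ih =>
      intro hp
      rw [List.flatMap_cons, List.pairwise_append]
      refine ⟨?_, ih (List.pairwise_cons.mp hp).2, ?_⟩
      · have h1 : ((pvT arr).filter (fun t => t.1 == (k : Int))).Pairwise
            (fun a b => a.2.1 < b.2.1) := hsnd.sublist List.filter_sublist
        refine h1.imp_of_mem ?_
        intro a b ha hb hab
        have hak : a.1 = (k : Int) := by simpa using (List.mem_filter.mp ha).2
        have hbk : b.1 = (k : Int) := by simpa using (List.mem_filter.mp hb).2
        exact pvKeyT_lt a b (Or.inr ⟨hak.trans hbk.symm, hab⟩)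
      · intro a ha b hb
        have hak : a.1 = (k : Int) := by simpa using (List.mem_filter.mp ha).2
        rw [List.mem_flatMap] at hb
        obtain ⟨d, hd, hbd⟩ := hb
        have hbd' : b.1 = (d : Int) := by simpa using (List.mem_filter.mp hbd).2
        have hkd : k < d := (List.pairwise_cons.mp hp).1 d hd
        apply pvKeyT_lt a b
        left
        rw [hak, hbd']
        exact_mod_cast hkd
  exact key (List.range 10) List.pairwise_lt_range

theorem pvThd_filter (arr : List Int) (d : Int) :
    ((pvT arr).filter (fun t => t.1 == d)).map (fun t => t.2.2)
      = arr.filter (fun x => pvKey x == d) := by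
  rw [pvT, List.filter_map, List.map_map]
  exact map_snd_filter_enumerate (fun x => pvKey x == d) arr 0

theorem modify_map_range {α : Type} (n : ℕ) (f : ℕ → α) (k : ℕ) (g : α → α) :
    ((List.range n).map f).modify k g
      = (List.range n).map (fun d => if d = k then g (f d) else f d) := by
  apply List.ext_getElem
  · simp
  · intro i h1 h2
    simp only [List.getElem_modify, List.getElem_map, List.getElem_range]
    rcases eq_or_ne i k with h | h
    · simp [h]
    · simp [h, Ne.symm h]

theorem pvBuckets_eq (arr : List Int) (f : ℕ → List Int) :
    arr.foldl (fun bs x => bs.modify (PySem.Int.mod x 10).toNat (fun b => b ++ [x]))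
        ((List.range 10).map f)
      = (List.range 10).map (fun d => f d ++ arr.filter (fun x => pvKey x == (d : Int))) := by
  induction arr generalizing f with
  | nil => simp
  | cons x xs ih =>
    have h0 : 0 ≤ PySem.Int.mod x 10 := PySem.Int.mod_nonneg _ (by norm_num)
    have h10 : PySem.Int.mod x 10 < 10 := PySem.Int.mod_lt _ (by norm_num)
    rw [List.foldl_cons, modify_map_range 10 f (PySem.Int.mod x 10).toNat _, ih]
    apply List.map_congr_left
    intro d hd
    rw [List.mem_range] at hd
    by_cases hdk : (d : Int) = PySem.Int.mod x 10
    · have hdt : d = (PySem.Int.mod x 10).toNat := by omega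
      subst hdt
      have hpk : (pvKey x == ((PySem.Int.mod x 10).toNat : Int)) = true := by
        unfold pvKey
        exact beq_iff_eq.mpr (by omega)
      rw [if_pos rfl, List.filter_cons, if_pos hpk, List.append_assoc,
        List.singleton_append]
    · have hdt : d ≠ (PySem.Int.mod x 10).toNat := by omega
      have hpk : (pvKey x == (d : Int)) = false := by
        unfold pvKey
        exact beq_eq_false_iff_ne.mpr (fun h => hdk h.symm)
      rw [if_neg hdt, List.filter_cons,
        if_neg (by rw [hpk]; exact Bool.false_ne_true)]

-- ===== VERDICT (by name: the statement is the Claim_ definition above) =====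
theorem sort_by_last_digit_spec : Claim_equal_sort_by_last_digit := by
  intro arr _
  unfold Spec_sort_by_last_digit
  show sort_by_last_digit arr = sort_by_last_digit_alt arr
  simp only [sort_by_last_digit, sort_by_last_digit_alt]
  rw [pvHeap_eq, pvPopAll_eq_map]
  have hrepl : (List.replicate 10 ([] : List Int)) = (List.range 10).map (fun _ => []) := by
    decide
  rw [hrepl, pvBuckets_eq]
  have hBT : pvPopAllT (pvT arr) = pvBT arr := by
    apply PySem.List.eq_of_perm_of_pairwise_le_of_injective pvKeyT pvKeyT_inj
    · exact (pvPopAllT_perm _).trans (pvBT_perm arr).symm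
    · exact (pvPopAllT_pairwise _ (pvT_nodup arr)).imp (fun h => le_of_lt h)
    · exact (pvBT_pairwise arr).imp (fun h => le_of_lt h)
  rw [hBT, pvBT, List.map_flatMap, List.flatMap_map]
  apply List.flatMap_congr
  intro d _
  rw [pvThd_filter]
  simp
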